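-- pv_equiv track=rewrite | github.com/g2git/adventofcode | 19-linen_layout.py | count_combinations_to_form_string
-- ===== SOURCE A (Python) =====
-- def count_combinations_to_form_string(target_string, available_elements):
--     # Initialize dp array where dp[i] is the number of ways to form the first i characters of the target string
--     target_string = target_string.strip()
--     dp = [0] * (len(target_string) + 1)
--     dp[0] = 1  # There's one way to form an empty string
--
--     # Loop through each character position in the target string
--     for i in range(1, len(target_string) + 1):
--         # Check each element in the available elements list
--         for element in available_elements:
--             # Check if the element can match the substring ending at position i
--             if i >= len(element) and target_string[i - len(element):i] == element:
--                 dp[i] += dp[i - len(element)]  # Add the number of ways to form the string up to the start of the element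
--
--     # The last position of dp will contain the number of ways to form the entire target string
--     return dp[len(target_string)]
-- ===== SOURCE B (Python) =====
-- def count_combinations_to_form_string(target_string, available_elements):
--     # Group the available elements by length (with multiplicities), so each
--     # position checks one hash lookup per distinct length instead of scanning
--     # every element.
--     target_string = target_string.strip()
--     by_len = {}
--     for element in available_elements:
--         length = len(element)
--         d = by_len.get(length, {})
--         d[element] = d.get(element, 0) + 1
--         by_len[length] = d
--     dp = [1]
--     for i in range(1, len(target_string) + 1):
--         total = 0
--         for length, pieces in by_len.items():
--             if length <= i:
--                 total += pieces.get(target_string[i - length:i], 0) * dp[i - length]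
--         dp.append(total)
--     return dp[len(target_string)]
-- ===== Notes on version B (the rewrite author's own statement) =====
-- stated objective: faster
-- what changed: B pre-groups the available elements into a dict of per-length multiplicity tables built once, so each target position does one substring hash-lookup per distinct element length (duplicates handled by multiplying counts) instead of scanning and slice-comparing every element, and dp is built by appending rather than updating a preallocated array in place.
-- outside the precondition, e.g. on count_combinations_to_form_string('a', ['', 'a']): A returns 1, B raises IndexError
import Mathlib
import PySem

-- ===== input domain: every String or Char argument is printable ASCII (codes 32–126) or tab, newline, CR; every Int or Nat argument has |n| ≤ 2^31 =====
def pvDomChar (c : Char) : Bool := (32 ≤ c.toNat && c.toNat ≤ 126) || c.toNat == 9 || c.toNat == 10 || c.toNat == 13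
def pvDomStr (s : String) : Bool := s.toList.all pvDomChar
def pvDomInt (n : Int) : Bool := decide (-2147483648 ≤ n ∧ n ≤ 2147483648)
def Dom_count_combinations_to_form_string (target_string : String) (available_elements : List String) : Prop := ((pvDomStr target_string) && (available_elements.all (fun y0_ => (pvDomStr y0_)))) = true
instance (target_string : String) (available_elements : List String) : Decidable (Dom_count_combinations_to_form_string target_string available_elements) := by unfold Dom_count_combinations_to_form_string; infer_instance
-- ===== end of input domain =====

-- B groups the available elements once into a dict of per-length multiplicity tables, so each
-- position does one substring lookup per distinct element length instead of scanning every element.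

-- ===== PORT A =====
def count_combinations_to_form_string (target_string : String) (available_elements : List String) : Int :=
  let t : List Char := PySem.Chars.strip target_string.toList   -- target_string = target_string.strip()
  let dp0 : List Int := (List.replicate (t.length + 1) (0 : Int)).set 0 1
  let dp := (PySem.List.pyRange 1 ((t.length : Int) + 1)).foldl (fun dp i =>
      available_elements.foldl (fun dp e =>
        let L : Int := (e.toList.length : Int)
        if L ≤ i ∧ PySem.List.slice t (some (i - L)) (some i) = e.toList then
          -- dp[i] += dp[i - len(element)]  (both indices are in range in Python here; pyGet?.getD is exact)
          dp.set i.toNat ((PySem.List.pyGet? dp i).getD 0 + (PySem.List.pyGet? dp (i - L)).getD 0)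
        else dp) dp) dp0
  (PySem.List.pyGet? dp (t.length : Int)).getD 0

-- ===== PORT B =====
def count_combinations_to_form_string_alt (target_string : String) (available_elements : List String) : Int :=
  let t : List Char := PySem.Chars.strip target_string.toList
  let byLen : PySem.Dict Int (PySem.Dict (List Char) Int) :=
    available_elements.foldl (fun byLen e =>
      let L : Int := (e.toList.length : Int)
      let d := byLen.getD L PySem.Dict.empty
      byLen.insert L (d.insert e.toList (d.getD e.toList 0 + 1))) PySem.Dict.empty
  let dp : List Int := (PySem.List.pyRange 1 ((t.length : Int) + 1)).foldl (fun dp i =>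
      let total := byLen.items.foldl (fun total p =>
        if p.1 ≤ i then
          -- dp[i - length] is in range in Python whenever Pre_ holds; pyGet?.getD is exact there
          total + p.2.getD (PySem.List.slice t (some (i - p.1)) (some i)) 0
                    * (PySem.List.pyGet? dp (i - p.1)).getD 0
        else total) 0
      dp ++ [total]) [1]
  (PySem.List.pyGet? dp (t.length : Int)).getD 0

-- ===== PRECONDITION & SPEC =====
-- Pre_ excludes element lists containing the empty string (for a non-empty stripped target):
-- the number of ways is then infinite, A's finite answer is an accident of its in-place update
-- order, and B's own algorithm raises an IndexError there.
def Pre_count_combinations_to_form_string (target_string : String) (available_elements : List String) : Prop :=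
  "" ∈ available_elements → PySem.Chars.strip target_string.toList = []
instance (target_string : String) (available_elements : List String) : Decidable (Pre_count_combinations_to_form_string target_string available_elements) := by unfold Pre_count_combinations_to_form_string; infer_instance
def pvWitness_count_combinations_to_form_string : String × List String := ("aab", ["a", "ab", "b"])
def Spec_count_combinations_to_form_string (target_string : String) (available_elements : List String) (out : Int) : Prop := out = count_combinations_to_form_string_alt target_string available_elements
instance (target_string : String) (available_elements : List String) (out : Int) : Decidable (Spec_count_combinations_to_form_string target_string available_elements out) := by unfold Spec_count_combinations_to_form_string; infer_instance

-- ===== CLAIM (what is proved, stated in full; the proofs are below) =====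
def Claim_equal_count_combinations_to_form_string : Prop := ∀ (target_string : String) (available_elements : List String), Dom_count_combinations_to_form_string target_string available_elements → Pre_count_combinations_to_form_string target_string available_elements → Spec_count_combinations_to_form_string target_string available_elements (count_combinations_to_form_string target_string available_elements)

-- ===== LEMMAS AND PROOFS =====

-- the contribution of one element e ending at position i, reading earlier dp values through `read`
def pvTerm (t : List Char) (i : Int) (read : Int → Int) (e : String) : Int :=
  if ((e.toList.length : Int) ≤ i ∧
      PySem.List.slice t (some (i - (e.toList.length : Int))) (some i) = e.toList) then
    read (i - (e.toList.length : Int))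
  else 0

-- the contribution of one byLen entry (a length and its multiplicity table) at position i
def pvF (t : List Char) (i : Int) (read : Int → Int) (p : Int × PySem.Dict (List Char) Int) : Int :=
  if p.1 ≤ i then p.2.getD (PySem.List.slice t (some (i - p.1)) (some i)) 0 * read (i - p.1) else 0

-- A's outer-loop step, A's dp after the first j outer iterations
def pvStepA (t : List Char) (avail : List String) (dp : List Int) (i : Int) : List Int :=
  avail.foldl (fun dp e =>
    let L : Int := (e.toList.length : Int)
    if L ≤ i ∧ PySem.List.slice t (some (i - L)) (some i) = e.toList then
      dp.set i.toNat ((PySem.List.pyGet? dp i).getD 0 + (PySem.List.pyGet? dp (i - L)).getD 0)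
    else dp) dp
def pvA (t : List Char) (avail : List String) (j : Nat) : List Int :=
  (PySem.List.pyRange 1 ((j:Int)+1)).foldl (pvStepA t avail) ((List.replicate (t.length + 1) (0:Int)).set 0 1)

-- B's grouped dict, B's outer-loop step, B's dp after the first j outer iterations
def pvByLen (avail : List String) : PySem.Dict Int (PySem.Dict (List Char) Int) :=
  avail.foldl (fun byLen e =>
    let L : Int := (e.toList.length : Int)
    let d := byLen.getD L PySem.Dict.empty
    byLen.insert L (d.insert e.toList (d.getD e.toList 0 + 1))) PySem.Dict.empty
def pvStepB (t : List Char) (avail : List String) (dp : List Int) (i : Int) : List Int :=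
  let total := (pvByLen avail).items.foldl (fun total p =>
    if p.1 ≤ i then
      total + p.2.getD (PySem.List.slice t (some (i - p.1)) (some i)) 0
                * (PySem.List.pyGet? dp (i - p.1)).getD 0
    else total) 0
  dp ++ [total]
def pvB (t : List Char) (avail : List String) (j : Nat) : List Int :=
  (PySem.List.pyRange 1 ((j:Int)+1)).foldl (pvStepB t avail) [1]

theorem pvA_succ (t : List Char) (avail : List String) (j : Nat) :
    pvA t avail (j+1) = pvStepA t avail (pvA t avail j) ((j:Int)+1) := by
  unfold pvA
  rw [show (((j+1:Nat)):Int)+1 = ((j:Int)+1)+1 by push_cast; ring,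
      PySem.List.pyRange_one_succ_right (by omega), List.foldl_append, List.foldl_cons,
      List.foldl_nil]

theorem pvB_succ (t : List Char) (avail : List String) (j : Nat) :
    pvB t avail (j+1) = pvStepB t avail (pvB t avail j) ((j:Int)+1) := by
  unfold pvB
  rw [show (((j+1:Nat)):Int)+1 = ((j:Int)+1)+1 by push_cast; ring,
      PySem.List.pyRange_one_succ_right (by omega), List.foldl_append, List.foldl_cons,
      List.foldl_nil]

-- A's inner loop over the elements adds Σ pvTerm to dp[i] (reads are below i, unaffected by the write)
theorem innerA (t : List Char) (i : Int) (l : List String) (dp : List Int)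
    (hi : 1 ≤ i) (hlen : i.toNat < dp.length) (hne : ∀ e ∈ l, e ≠ "") :
    l.foldl (fun dp e =>
        let L : Int := (e.toList.length : Int)
        if L ≤ i ∧ PySem.List.slice t (some (i - L)) (some i) = e.toList then
          dp.set i.toNat ((PySem.List.pyGet? dp i).getD 0 + (PySem.List.pyGet? dp (i - L)).getD 0)
        else dp) dp
    = dp.set i.toNat ((PySem.List.pyGet? dp i).getD 0 +
        (l.map (pvTerm t i (fun j => (PySem.List.pyGet? dp j).getD 0))).sum) := by
  induction l generalizing dp with
  | nil =>
    simp only [List.foldl_nil, List.map_nil, List.sum_nil, add_zero]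
    have h0 : (0:Int) ≤ i := by omega
    have hg : PySem.List.pyGet? dp i = dp[i.toNat]? := by
      have := PySem.List.pyGet?_natCast dp i.toNat
      rwa [Int.toNat_of_nonneg h0] at this
    rw [hg, List.getElem?_eq_getElem hlen]
    simp [List.set_getElem_self]
  | cons e l ih =>
    simp only [List.foldl_cons, List.map_cons, List.sum_cons]
    set L : Int := (e.toList.length : Int) with hL
    by_cases hcond : L ≤ i ∧ PySem.List.slice t (some (i - L)) (some i) = e.toList
    · rw [if_pos hcond]
      set dp' := dp.set i.toNat ((PySem.List.pyGet? dp i).getD 0 + (PySem.List.pyGet? dp (i - L)).getD 0) with hdp'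
      rw [ih dp' (by simpa [hdp'] using hlen) (fun e he => hne e (List.mem_cons_of_mem _ he))]
      have hget : ∀ j : Int, 0 ≤ j → j < i → PySem.List.pyGet? dp' j = PySem.List.pyGet? dp j := by
        intro j hj0 hji
        have h1 : PySem.List.pyGet? dp' j = dp'[j.toNat]? := by
          have := PySem.List.pyGet?_natCast dp' j.toNat
          rwa [Int.toNat_of_nonneg hj0] at this
        have h2 : PySem.List.pyGet? dp j = dp[j.toNat]? := by
          have := PySem.List.pyGet?_natCast dp j.toNat
          rwa [Int.toNat_of_nonneg hj0] at this
        rw [h1, h2, hdp', List.getElem?_set_ne (by omega)]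
      have hterms : l.map (pvTerm t i (fun j => (PySem.List.pyGet? dp' j).getD 0))
          = l.map (pvTerm t i (fun j => (PySem.List.pyGet? dp j).getD 0)) := by
        apply List.map_congr_left
        intro e' he'
        simp only [pvTerm]
        split_ifs with h
        · have hpos : e'.toList.length ≠ 0 := by
            intro h0
            exact hne e' (List.mem_cons_of_mem _ he')
              (String.toList_eq_nil_iff.mp (List.length_eq_zero_iff.mp h0))
          rw [hget _ (by omega) (by omega)]
        · rfl
      have hgi : PySem.List.pyGet? dp' i
          = some ((PySem.List.pyGet? dp i).getD 0 + (PySem.List.pyGet? dp (i - L)).getD 0) := by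
        have h0 : (0:Int) ≤ i := by omega
        have h1 : PySem.List.pyGet? dp' i = dp'[i.toNat]? := by
          have := PySem.List.pyGet?_natCast dp' i.toNat
          rwa [Int.toNat_of_nonneg h0] at this
        rw [h1, hdp', List.getElem?_set_self hlen]
      rw [hterms, hgi, hdp', List.set_set]
      have hte : pvTerm t i (fun j => (PySem.List.pyGet? dp j).getD 0) e
          = (PySem.List.pyGet? dp (i - L)).getD 0 := by
        simp only [pvTerm, ← hL, if_pos hcond]
      rw [hte]
      congr 1
      simp only [Option.getD_some]
      ring
    · rw [if_neg hcond, ih dp hlen (fun e he => hne e (List.mem_cons_of_mem _ he))]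
      have hte : pvTerm t i (fun j => (PySem.List.pyGet? dp j).getD 0) e = 0 := by
        simp only [pvTerm, ← hL, if_neg hcond]
      rw [hte]
      ring_nf

-- B's inner loop over the items is the pvF-sum
theorem innerB (t : List Char) (i : Int) (byLen : PySem.Dict Int (PySem.Dict (List Char) Int))
    (dp : List Int) :
    byLen.items.foldl (fun total p =>
        if p.1 ≤ i then
          total + p.2.getD (PySem.List.slice t (some (i - p.1)) (some i)) 0
                    * (PySem.List.pyGet? dp (i - p.1)).getD 0
        else total) 0
    = (byLen.items.map (pvF t i (fun j => (PySem.List.pyGet? dp j).getD 0))).sum := by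
  have hstep : (fun (total : Int) (p : Int × PySem.Dict (List Char) Int) =>
        if p.1 ≤ i then
          total + p.2.getD (PySem.List.slice t (some (i - p.1)) (some i)) 0
                    * (PySem.List.pyGet? dp (i - p.1)).getD 0
        else total)
      = fun total p => total + pvF t i (fun j => (PySem.List.pyGet? dp j).getD 0) p := by
    funext total p
    by_cases h : p.1 ≤ i <;> simp [pvF, h]
  rw [hstep, PySem.List.foldl_add]
  ring

theorem sum_map_replace {ν : Type} (F : Int × ν → Int) (l : List (Int × ν)) (k : Int) (w v : ν)
    (hnd : (l.map Prod.fst).Nodup) (hmem : (k, w) ∈ l) :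
    ((l.map (fun p => if p.1 == k then (k, v) else p)).map F).sum
      = (l.map F).sum - F (k, w) + F (k, v) := by
  induction l with
  | nil => cases hmem
  | cons p l ih =>
    simp only [List.map_cons, List.nodup_cons, List.mem_map] at hnd
    rcases List.mem_cons.mp hmem with rfl | hmem'
    · have hrest : l.map (fun p => if p.1 == k then (k, v) else p) = l := by
        have h2 : ∀ q ∈ l, (if q.1 == k then (k, v) else q) = q := by
          intro q hq
          have : ¬ (q.1 == k) = true := by
            intro hq1
            exact hnd.1 ⟨q, hq, by simpa using hq1⟩
          simp [this]
        simpa using List.map_congr_left h2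
      simp only [List.map_cons, hrest, List.sum_cons, BEq.rfl, if_true]
      ring
    · have hp1 : ¬ (p.1 == k) = true := by
        intro h
        exact hnd.1 ⟨(k, w), hmem', by simpa using (eq_of_beq h).symm⟩
      simp only [List.map_cons, List.sum_cons, if_neg hp1, ih hnd.2 hmem']
      ring

-- one dict update changes pvF of that entry by exactly pvTerm of the inserted element
theorem pvF_insert (t : List Char) (i : Int) (read : Int → Int) (e : String)
    (w : PySem.Dict (List Char) Int) :
    pvF t i read ((e.toList.length : Int), w.insert e.toList (w.getD e.toList 0 + 1))
      = pvF t i read ((e.toList.length : Int), w) + pvTerm t i read e := by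
  set L : Int := (e.toList.length : Int) with hL
  by_cases hLi : L ≤ i
  · simp only [pvF, pvTerm, ← hL, if_pos hLi, PySem.Dict.getD_insert]
    by_cases hsl : PySem.List.slice t (some (i - L)) (some i) = e.toList
    · rw [if_pos hsl, if_pos ⟨hLi, hsl⟩, hsl]; ring
    · rw [if_neg hsl, if_neg (fun h => hsl h.2)]; ring
  · simp only [pvF, pvTerm, ← hL, if_neg hLi, if_neg (fun h : L ≤ i ∧ _ => hLi h.1)]
    ring

theorem pvF_empty (t : List Char) (i : Int) (read : Int → Int) (L : Int) :
    pvF t i read (L, (PySem.Dict.empty : PySem.Dict (List Char) Int)) = 0 := by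
  simp [pvF, PySem.Dict.getD_empty]

-- one insertion step changes the pvF-sum by exactly pvTerm of the inserted element
theorem sum_items_step (t : List Char) (i : Int) (read : Int → Int) (e : String)
    (d0 : PySem.Dict Int (PySem.Dict (List Char) Int)) (hnd : d0.keys.Nodup) :
    ((d0.insert (e.toList.length : Int)
        ((d0.getD (e.toList.length : Int) PySem.Dict.empty).insert e.toList
          ((d0.getD (e.toList.length : Int) PySem.Dict.empty).getD e.toList 0 + 1))).items.map (pvF t i read)).sum
      = (d0.items.map (pvF t i read)).sum + pvTerm t i read e := by
  set L : Int := (e.toList.length : Int) with hL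
  by_cases hc : d0.contains L = true
  · obtain ⟨w, hw⟩ : ∃ w, d0.get? L = some w := by
      have h := PySem.Dict.contains_eq_isSome_get? d0 L
      rw [hc] at h
      exact Option.isSome_iff_exists.mp h.symm
    have hwD : d0.getD L PySem.Dict.empty = w := PySem.Dict.getD_of_get?_eq_some _ _ hw
    have hmem : (L, w) ∈ d0.items := PySem.Dict.mem_items_of_get?_eq_some _ hw
    have hndl : (d0.items.map Prod.fst).Nodup := by simpa [PySem.Dict.keys] using hnd
    rw [PySem.Dict.items_insert_of_contains _ _ hc,
        sum_map_replace (pvF t i read) d0.items L w _ hndl hmem, hwD]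
    rw [hL, pvF_insert t i read e w, ← hL]
    ring
  · have hc' : d0.contains L = false := by simpa using hc
    have hwD : d0.getD L PySem.Dict.empty = PySem.Dict.empty :=
      PySem.Dict.getD_of_not_contains _ _ hc'
    rw [PySem.Dict.items_insert_of_not_contains _ _ hc', hwD]
    simp only [List.map_append, List.sum_append, List.map_cons, List.map_nil, List.sum_cons,
      List.sum_nil]
    rw [hL, pvF_insert t i read e PySem.Dict.empty, pvF_empty]
    ring

-- summing pvF over the grouped dict equals summing pvTerm over the elements it groups
theorem sum_items_byLen (t : List Char) (i : Int) (read : Int → Int) (l : List String)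
    (d0 : PySem.Dict Int (PySem.Dict (List Char) Int)) (hnd : d0.keys.Nodup) :
    ((l.foldl (fun byLen e =>
        let L : Int := (e.toList.length : Int)
        let d := byLen.getD L PySem.Dict.empty
        byLen.insert L (d.insert e.toList (d.getD e.toList 0 + 1))) d0).items.map (pvF t i read)).sum
      = (d0.items.map (pvF t i read)).sum + (l.map (pvTerm t i read)).sum := by
  induction l generalizing d0 with
  | nil => simp
  | cons e l ih =>
    simp only [List.foldl_cons]
    rw [ih _ (PySem.Dict.nodup_keys_insert _ _ _ hnd), sum_items_step t i read e d0 hnd]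
    simp only [List.map_cons, List.sum_cons]
    ring

-- the two dp states after j outer steps: A's array is B's list padded with the unwritten zeros
theorem outerInv (t : List Char) (avail : List String) (hne : ∀ e ∈ avail, e ≠ "")
    (j : Nat) (hj : j ≤ t.length) :
    pvA t avail j = pvB t avail j ++ List.replicate (t.length - j) 0
    ∧ (pvB t avail j).length = j + 1 := by
  induction j with
  | zero =>
    unfold pvA pvB
    rw [show (((0:Nat):Int)+1) = 1 by norm_num]
    rw [show PySem.List.pyRange 1 1 = [] from rfl]
    simp [List.replicate_succ]
  | succ j ih =>
    obtain ⟨hAB, hBlen⟩ := ih (by omega)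
    rw [pvA_succ, pvB_succ]
    set i : Int := (j:Int)+1 with hidef
    have hicast : i = ((j+1 : Nat) : Int) := by push_cast; ring
    have hBtot : pvStepB t avail (pvB t avail j) i
        = pvB t avail j ++ [(avail.map (pvTerm t i
            (fun k => (PySem.List.pyGet? (pvB t avail j) k).getD 0))).sum] := by
      unfold pvStepB
      rw [innerB]
      unfold pvByLen
      rw [sum_items_byLen t i _ avail PySem.Dict.empty (by simp [PySem.Dict.keys_empty])]
      simp [show (PySem.Dict.empty : PySem.Dict Int (PySem.Dict (List Char) Int)).items = [] from rfl]
    have hlenA : i.toNat < (pvA t avail j).length := by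
      rw [hAB, List.length_append, hBlen, List.length_replicate]
      omega
    have hstepA : pvStepA t avail (pvA t avail j) i
        = (pvA t avail j).set i.toNat ((PySem.List.pyGet? (pvA t avail j) i).getD 0 +
            (avail.map (pvTerm t i (fun k => (PySem.List.pyGet? (pvA t avail j) k).getD 0))).sum) :=
      innerA t i avail (pvA t avail j) (by omega) hlenA hne
    have hA_i : PySem.List.pyGet? (pvA t avail j) i = some 0 := by
      rw [hicast, PySem.List.pyGet?_natCast, hAB,
          List.getElem?_append_right (by omega : (pvB t avail j).length ≤ j+1)]
      rw [hBlen, Nat.sub_self]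
      rw [List.getElem?_eq_getElem (by simp [List.length_replicate]; omega)]
      simp
    have hreads : avail.map (pvTerm t i (fun k => (PySem.List.pyGet? (pvA t avail j) k).getD 0))
        = avail.map (pvTerm t i (fun k => (PySem.List.pyGet? (pvB t avail j) k).getD 0)) := by
      apply List.map_congr_left
      intro e' he'
      simp only [pvTerm]
      split_ifs with h
      · have hpos : e'.toList.length ≠ 0 := by
          intro h0
          exact hne e' he' (String.toList_eq_nil_iff.mp (List.length_eq_zero_iff.mp h0))
        have hk0 : (0:Int) ≤ i - (e'.toList.length : Int) := by omega
        have hklt : (i - (e'.toList.length : Int)).toNat < (pvB t avail j).length := by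
          rw [hBlen]; omega
        have hcast2 : i - (e'.toList.length : Int) = (((i - (e'.toList.length : Int)).toNat : Nat) : Int) :=
          (Int.toNat_of_nonneg hk0).symm
        rw [hcast2, PySem.List.pyGet?_natCast, PySem.List.pyGet?_natCast, hAB,
            List.getElem?_append_left hklt]
      · rfl
    have hset : i.toNat = (pvB t avail j).length := by
      rw [hBlen, hicast]; simp
    constructor
    · rw [hstepA, hBtot, hA_i, hreads, hAB, List.set_append_right _ _ (le_of_eq hset.symm)]
      rw [hset, Nat.sub_self]
      have hrep : List.replicate (t.length - j) (0:Int)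
          = 0 :: List.replicate (t.length - (j+1)) 0 := by
        rw [← List.replicate_succ]
        congr 1
        omega
      rw [hrep, List.set_cons_zero]
      simp
    · rw [hBtot, List.length_append, hBlen]
      simp
-- final assembly
theorem count_combinations_to_form_string_spec : Claim_equal_count_combinations_to_form_string := by
  unfold Claim_equal_count_combinations_to_form_string
  intro target_string avail _ hpre
  unfold Spec_count_combinations_to_form_string
  show count_combinations_to_form_string target_string avail
      = count_combinations_to_form_string_alt target_string avail
  unfold count_combinations_to_form_string count_combinations_to_form_string_alt
  set t : List Char := PySem.Chars.strip target_string.toList with ht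
  by_cases htnil : t = []
  · rw [htnil]
    rfl
  · have hne : ∀ e ∈ avail, e ≠ "" := by
      intro e he hee
      exact htnil (hpre (hee ▸ he))
    obtain ⟨hAB, hBlen⟩ := outerInv t avail hne t.length le_rfl
    show (PySem.List.pyGet? (pvA t avail t.length) (t.length : Int)).getD 0
        = (PySem.List.pyGet? (pvB t avail t.length) (t.length : Int)).getD 0
    rw [hAB, Nat.sub_self, List.replicate_zero, List.append_nil]
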